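-- pv_equiv track=rewrite | github.com/medvedikur/erc3_mine | agent-erc3-dev/handlers/middleware/guards/name_resolution_guards.py | _check_names_searched
-- ===== SOURCE A (Python) =====
-- from typing import Optional, List, Tuple
--
-- def _check_names_searched(human_names: List[Tuple[str, str]],
--                            search_queries: List[str]) -> bool:
--     """Check if any human name was included in employees_search queries."""
--     for first, last in human_names:
--         name_variants = [
--             f"{first} {last}",
--             f"{last} {first}",
--             first,
--             last,
--             f"{first.lower()}_{last.lower()}",
--             f"{last.lower()}_{first.lower()}",
--         ]
--
--         for query in search_queries:
--             query_lower = query.lower()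
--             for variant in name_variants:
--                 if variant.lower() in query_lower:
--                     return True
--
--     return False
-- ===== SOURCE B (Python) =====
-- from typing import Optional, List, Tuple
--
-- def _check_names_searched(human_names: List[Tuple[str, str]],
--                           search_queries: List[str]) -> bool:
--     """Check if any human name was included in employees_search queries.
--
--     Every compound variant A builds ("first last", "last first",
--     "first_last", "last_first") contains the bare first name (and the bare
--     last name) as a substring, and the bare names are themselves variants.
--     Hence "some variant is a substring of some query" holds iff the bare
--     lowercased first or last name is a substring of some lowercased query,
--     so the six-variant check collapses to two membership tests per pair.
--     """
--     lowered = [q.lower() for q in search_queries]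
--     return any(first.lower() in q or last.lower() in q
--                for first, last in human_names for q in lowered)
-- ===== Notes on version B (the rewrite author's own statement) =====
-- stated objective: faster
-- what changed: B exploits that every compound variant A builds contains the bare first (and last) name as a substring, so the six-variant test collapses to checking only the lowercased bare first/last name against each lowercased query (lowered once), removing the variant-list construction entirely.
import Mathlib
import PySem

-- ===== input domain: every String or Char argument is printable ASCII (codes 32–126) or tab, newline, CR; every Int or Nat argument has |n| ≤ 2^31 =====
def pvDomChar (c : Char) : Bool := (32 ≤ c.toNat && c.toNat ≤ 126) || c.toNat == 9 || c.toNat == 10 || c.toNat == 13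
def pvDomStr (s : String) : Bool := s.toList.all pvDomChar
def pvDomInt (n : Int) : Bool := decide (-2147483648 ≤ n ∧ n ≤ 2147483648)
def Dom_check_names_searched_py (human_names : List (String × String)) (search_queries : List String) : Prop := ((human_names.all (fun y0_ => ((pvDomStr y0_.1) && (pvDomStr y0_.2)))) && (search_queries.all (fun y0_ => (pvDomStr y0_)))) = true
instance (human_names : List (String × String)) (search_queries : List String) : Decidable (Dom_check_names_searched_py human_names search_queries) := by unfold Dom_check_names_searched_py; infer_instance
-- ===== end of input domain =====

-- B replaces A's six-variant substring scan by the observation that every compound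
-- variant contains the bare first/last name, so two membership tests per pair suffice;
-- simpler, same return value, no side effects.

-- ===== PORT A =====
-- the six f-string variants built for one (first, last) pair, in A's order
def pvVariantsA (first last : String) : List String :=
  [PySem.Str.join "" [first, " ", last],
   PySem.Str.join "" [last, " ", first],
   first,
   last,
   PySem.Str.join "" [PySem.Str.lower first, "_", PySem.Str.lower last],
   PySem.Str.join "" [PySem.Str.lower last, "_", PySem.Str.lower first]]

def check_names_searched_py (human_names : List (String × String)) (search_queries : List String) : Bool :=
  human_names.any (fun fl =>
    search_queries.any (fun query =>
      let query_lower := PySem.Str.lower query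
      (pvVariantsA fl.1 fl.2).any (fun variant =>
        PySem.Str.isIn (PySem.Str.lower variant) query_lower)))

-- ===== PORT B =====
def check_names_searched_py_alt (human_names : List (String × String)) (search_queries : List String) : Bool :=
  let lowered := search_queries.map PySem.Str.lower
  human_names.any (fun fl =>
    lowered.any (fun q =>
      PySem.Str.isIn (PySem.Str.lower fl.1) q || PySem.Str.isIn (PySem.Str.lower fl.2) q))

-- ===== PRECONDITION & SPEC =====
def Spec_check_names_searched_py (human_names : List (String × String)) (search_queries : List String) (out : Bool) : Prop := out = check_names_searched_py_alt human_names search_queries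
instance (human_names : List (String × String)) (search_queries : List String) (out : Bool) : Decidable (Spec_check_names_searched_py human_names search_queries out) := by unfold Spec_check_names_searched_py; infer_instance

-- ===== CLAIM =====
def Claim_equal_check_names_searched_py : Prop := ∀ (human_names : List (String × String)) (search_queries : List String), Dom_check_names_searched_py human_names search_queries → Spec_check_names_searched_py human_names search_queries (check_names_searched_py human_names search_queries)

-- ===== LEMMAS AND PROOFS =====
theorem pvCharLeToNat {a b : Char} (h : a ≤ b) : a.toNat ≤ b.toNat :=
  UInt32.le_iff_toNat_le.mp (Char.le_def.mp h)

-- str.lower is idempotent per character (ASCII-exact, as PySem defines it)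
theorem pvLowerChar_idem (c : Char) :
    PySem.Chars.lowerChar (PySem.Chars.lowerChar c) = PySem.Chars.lowerChar c := by
  unfold PySem.Chars.lowerChar PySem.Chars.isupper
  split_ifs with h1 h2 <;> try rfl
  exfalso
  simp only [Bool.and_eq_true, decide_eq_true_eq] at h1 h2
  have b1 : 65 ≤ c.toNat := pvCharLeToNat h1.1
  have b2 : c.toNat ≤ 90 := pvCharLeToNat h1.2
  have hval : (Char.ofNat (c.toNat + 32)).toNat = c.toNat + 32 := by
    rw [Char.toNat_ofNat, if_pos]
    exact Or.inl (by omega)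
  have b3 : (Char.ofNat (c.toNat + 32)).toNat ≤ 90 := pvCharLeToNat h2.2
  rw [hval] at b3
  omega

theorem pvLower_idem (s : List Char) :
    PySem.Chars.lower (PySem.Chars.lower s) = PySem.Chars.lower s := by
  simp [PySem.Chars.lower, List.map_map, Function.comp_def, pvLowerChar_idem]

-- the char list of a 3-part join with empty separator
theorem pvJoin3_toList (a m b : String) :
    (PySem.Str.join "" [a, m, b]).toList = a.toList ++ m.toList ++ b.toList := by
  simp [PySem.Str.join, PySem.Chars.join, List.intercalate, List.intersperse]

-- lowering distributes over the 3-part join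
theorem pvLower_join3 (a m b : String) :
    (PySem.Str.lower (PySem.Str.join "" [a, m, b])).toList
      = PySem.Chars.lower a.toList ++ PySem.Chars.lower m.toList ++ PySem.Chars.lower b.toList := by
  rw [PySem.Str.toList_lower, pvJoin3_toList]
  simp [PySem.Chars.lower]

-- a left part of an infix of ql is an infix of ql
theorem pvIsIn_of_left {x y ql : List Char}
    (h : PySem.Chars.isIn (x ++ y) ql = true) : PySem.Chars.isIn x ql = true := by
  rw [PySem.Chars.isIn_iff_infix] at h ⊢
  exact ((x.prefix_append y).isInfix).trans h

-- the inner 6-variant scan of A equals B's two membership tests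
theorem pvInner_eq (first last q : String) :
    ((pvVariantsA first last).any (fun variant =>
        PySem.Str.isIn (PySem.Str.lower variant) (PySem.Str.lower q)))
      = (PySem.Str.isIn (PySem.Str.lower first) (PySem.Str.lower q)
         || PySem.Str.isIn (PySem.Str.lower last) (PySem.Str.lower q)) := by
  rw [Bool.eq_iff_iff]
  simp only [pvVariantsA, List.any_cons, List.any_nil, Bool.or_eq_true, Bool.or_false]
  constructor
  · rintro (h | h | h | h | h | h)
    · left
      rw [PySem.Str.isIn_eq, pvLower_join3, List.append_assoc] at h
      rw [PySem.Str.isIn_eq]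
      simpa [PySem.Str.lower] using pvIsIn_of_left h
    · right
      rw [PySem.Str.isIn_eq, pvLower_join3, List.append_assoc] at h
      rw [PySem.Str.isIn_eq]
      simpa [PySem.Str.lower] using pvIsIn_of_left h
    · exact Or.inl h
    · exact Or.inr h
    · left
      rw [PySem.Str.isIn_eq, pvLower_join3, List.append_assoc] at h
      rw [PySem.Str.isIn_eq]
      have := pvIsIn_of_left h
      simpa [PySem.Str.lower, pvLower_idem] using this
    · right
      rw [PySem.Str.isIn_eq, pvLower_join3, List.append_assoc] at h
      rw [PySem.Str.isIn_eq]
      have := pvIsIn_of_left h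
      simpa [PySem.Str.lower, pvLower_idem] using this
  · rintro (h | h)
    · exact Or.inr (Or.inr (Or.inl h))
    · exact Or.inr (Or.inr (Or.inr (Or.inl h)))

-- ===== VERDICT =====
theorem check_names_searched_py_spec : Claim_equal_check_names_searched_py := by
  intro human_names search_queries _hDom
  show check_names_searched_py human_names search_queries
      = check_names_searched_py_alt human_names search_queries
  simp only [check_names_searched_py, check_names_searched_py_alt, List.any_map, pvInner_eq, Function.comp_def]
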